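-- pv_equiv track=rewrite | github.com/ModeBeater/Programming-principles-2 | Week2/functions1/LAST.py | naruto6
-- ===== SOURCE A (Python) =====
-- def naruto6(a):
--     arr = []
--     for i in a:
--         arr.append(i)
--     cnt = len(arr) - 1
--     ans = ''
--     while cnt >= 0:
--         ans += arr[cnt] + ' '
--         cnt -= 1
--     return ans
-- ===== SOURCE B (Python) =====
-- def naruto6(a):
--     ans = ''
--     for x in a:
--         ans = x + ' ' + ans
--     return ans
-- ===== Notes on version B (the rewrite author's own statement) =====
-- stated objective: simpler
-- what changed: Single forward pass that prepends each element (x + ' ' + ans) to an accumulator, removing A's list copy and backward index loop.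
import Mathlib
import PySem

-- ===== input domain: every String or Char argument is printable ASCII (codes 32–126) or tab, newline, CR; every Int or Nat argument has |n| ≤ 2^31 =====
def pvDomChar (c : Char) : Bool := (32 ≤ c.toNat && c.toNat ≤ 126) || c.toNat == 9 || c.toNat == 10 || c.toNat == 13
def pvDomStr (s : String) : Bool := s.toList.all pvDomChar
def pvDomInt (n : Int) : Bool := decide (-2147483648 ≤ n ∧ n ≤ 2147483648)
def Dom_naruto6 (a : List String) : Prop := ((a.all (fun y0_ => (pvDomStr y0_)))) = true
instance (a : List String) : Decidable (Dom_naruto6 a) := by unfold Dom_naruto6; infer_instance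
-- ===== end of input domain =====

-- B replaces A's list copy and backward index loop by a single forward pass that
-- prepends each element to an accumulator (objective: simpler).

-- ===== PORT A =====
-- while cnt >= 0: ans += arr[cnt] + ' '; cnt -= 1   — recursion on the counter
-- (n = cnt + 1, so n = 0 is the loop exit; arr[cnt] via PySem.List.pyGet?,
-- always in range here, getD "" is never taken).
def naruto6Loop (arr : List String) (n : Nat) (ans : String) : String :=
  match n with
  | 0 => ans
  | m + 1 => naruto6Loop arr m (ans ++ ((PySem.List.pyGet? arr (m : Int)).getD "") ++ " ")

def naruto6 (a : List String) : String :=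
  let arr := a.foldl (fun acc i => acc ++ [i]) []
  naruto6Loop arr arr.length ""

-- ===== PORT B =====
def naruto6_alt (a : List String) : String :=
  a.foldl (fun ans x => x ++ " " ++ ans) ""

-- ===== PRECONDITION & SPEC =====
def Spec_naruto6 (a : List String) (out : String) : Prop := out = naruto6_alt a
instance (a : List String) (out : String) : Decidable (Spec_naruto6 a out) := by unfold Spec_naruto6; infer_instance

-- ===== CLAIM (what is proved, stated in full; the proofs are below) =====
def Claim_equal_naruto6 : Prop := ∀ (a : List String), Dom_naruto6 a → Spec_naruto6 a (naruto6 a)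

-- ===== LEMMAS AND PROOFS =====

-- canonical result: g [x0,…,xk] = xk ++ " " ++ … ++ x0 ++ " "
def pvG : List String → String
  | [] => ""
  | x :: xs => pvG xs ++ x ++ " "

theorem pvG_append_singleton (s : List String) (y : String) :
    pvG (s ++ [y]) = y ++ " " ++ pvG s := by
  induction s with
  | nil => simp [pvG]
  | cons x xs ih =>
      simp only [List.cons_append, pvG, ih]
      simp [String.append_assoc]

theorem pv_copy (a acc : List String) :
    a.foldl (fun acc i => acc ++ [i]) acc = acc ++ a := by
  induction a generalizing acc with
  | nil => simp
  | cons x xs ih => simp [List.foldl, ih]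

theorem pv_loop (l : List String) (n : Nat) (h : n ≤ l.length) (ans : String) :
    naruto6Loop l n ans = ans ++ pvG (l.take n) := by
  induction n generalizing ans with
  | zero => simp [naruto6Loop, pvG]
  | succ m ih =>
      have hm : m < l.length := h
      have htake : l.take (m + 1) = l.take m ++ [l[m]] := by
        simp [List.take_succ]
      rw [naruto6Loop, PySem.List.pyGet?_natCast, List.getElem?_eq_getElem hm,
        ih (Nat.le_of_lt hm), htake, pvG_append_singleton]
      simp [String.append_assoc]

theorem pv_alt (l : List String) (ans : String) :
    l.foldl (fun ans x => x ++ " " ++ ans) ans = pvG l ++ ans := by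
  induction l generalizing ans with
  | nil => simp [pvG]
  | cons x xs ih =>
      rw [List.foldl_cons, ih]
      simp [pvG, String.append_assoc]

-- ===== VERDICT (by name: the statement is the Claim_ definition above) =====
theorem naruto6_spec : Claim_equal_naruto6 := by
  intro a _
  unfold Spec_naruto6 naruto6 naruto6_alt
  rw [pv_copy, List.nil_append, pv_loop a a.length (Nat.le_refl _), pv_alt]
  simp
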